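-- pv_equiv track=rewrite | github.com/jmdagamewiz/sudoku-on-cmd | backend.py | get_grid
-- ===== SOURCE A (Python) =====
-- def get_grid(sudoku_string):
--     grid = []
--
--     j = 0
--     row_string = ""
--
--     for i in range(len(sudoku_string)):
--         j = j + 1
--         row_string = row_string + sudoku_string[i]
--
--         if j == 9:
--             row_list = list(row_string)
--
--             for index in range(len(row_list)):
--                 if row_list[index] == ".":
--                     row_list[index] = " "
--
--             grid.append(row_list)
--             row_string = ""
--             j = 0
--
--     return grid
-- ===== SOURCE B (Python) =====
-- def get_grid(sudoku_string):
--     # one global transform, then cut complete rows of 9 by slicing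
--     cleaned = [' ' if c == '.' else c for c in sudoku_string]
--     n = len(cleaned) - len(cleaned) % 9   # keep only complete rows
--     return [cleaned[i:i + 9] for i in range(0, n, 9)]
-- ===== Notes on version B (the rewrite author's own statement) =====
-- stated objective: simpler
-- what changed: A's interleaved per-character accumulation with a j-counter and a nested index loop replacing dots is replaced by one global dot-to-space transform followed by index slicing into complete rows of 9.
import Mathlib
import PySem

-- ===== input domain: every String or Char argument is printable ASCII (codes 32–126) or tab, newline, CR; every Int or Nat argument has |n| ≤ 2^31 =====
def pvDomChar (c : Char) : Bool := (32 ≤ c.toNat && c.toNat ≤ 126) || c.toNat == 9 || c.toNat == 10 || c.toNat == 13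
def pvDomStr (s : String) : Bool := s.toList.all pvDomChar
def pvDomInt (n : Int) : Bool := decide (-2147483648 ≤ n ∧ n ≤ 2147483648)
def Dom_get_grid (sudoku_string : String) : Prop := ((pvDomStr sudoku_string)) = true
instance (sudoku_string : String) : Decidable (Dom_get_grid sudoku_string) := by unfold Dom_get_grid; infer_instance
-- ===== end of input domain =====

-- B replaces A's per-character accumulation (j-counter + nested dot-replacement loop)
-- by one global dot-to-space map followed by slicing into complete rows of 9 (simpler decomposition).


-- ===== PORT A =====
-- Python inner loop: 'for index in range(len(row_list)): if row_list[index] == ".": row_list[index] = " "'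
-- (indices run over 0 ≤ index < len, so getD/set are exact here)
def rowReplace (rs : List String) : List String :=
  (List.range rs.length).foldl
    (fun rl index => if rl.getD index "" = "." then rl.set index " " else rl) rs

-- one iteration of A's outer loop; state = (grid, j, row_string)
def stepA (st : List (List String) × Nat × List Char) (c : Char) :
    List (List String) × Nat × List Char :=
  let j := st.2.1 + 1
  let row_string := st.2.2 ++ [c]
  if j = 9 then
    (st.1 ++ [rowReplace (row_string.map String.singleton)], 0, ([] : List Char))
  else
    (st.1, j, row_string)

-- 'for i in range(len(sudoku_string))' reading sudoku_string[i] visits exactly the chars in order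
def get_grid (sudoku_string : String) : List (List String) :=
  (sudoku_string.toList.foldl stepA ([], 0, [])).1

-- ===== PORT B =====
def get_grid_alt (sudoku_string : String) : List (List String) :=
  let cleaned := sudoku_string.toList.map
    (fun c => if c = '.' then String.singleton ' ' else String.singleton c)
  let n : Int := (cleaned.length : Int) - PySem.Int.mod (cleaned.length : Int) 9
  (PySem.List.pyRange 0 n 9).map
    (fun i => PySem.List.slice cleaned (some i) (some (i + 9)))

-- ===== PRECONDITION & SPEC =====
def Spec_get_grid (sudoku_string : String) (out : List (List String)) : Prop := out = get_grid_alt sudoku_string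
instance (sudoku_string : String) (out : List (List String)) : Decidable (Spec_get_grid sudoku_string out) := by unfold Spec_get_grid; infer_instance

-- ===== CLAIM (what is proved, stated in full; the proofs are below) =====
def Claim_equal_get_grid : Prop := ∀ (sudoku_string : String), Dom_get_grid sudoku_string → Spec_get_grid sudoku_string (get_grid sudoku_string)

-- ===== LEMMAS AND PROOFS =====

-- the element transform both programs perform on each character
def pvElem (c : Char) : String := if c = '.' then String.singleton ' ' else String.singleton c

-- common characterisation: the grid is the complete 9-blocks, each mapped by pvElem
def pvGridOf (l : List Char) : List (List String) :=
  (List.range (l.length / 9)).map (fun j => ((l.drop (9 * j)).take 9).map pvElem)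

theorem pv_foldl_succ_idx (step : List String → Nat → List String)
    (hstep : ∀ b t i, step (b :: t) (i + 1) = b :: step t i) :
    ∀ (idxs : List Nat) (b : String) (t : List String),
      (idxs.map Nat.succ).foldl step (b :: t) = b :: idxs.foldl step t := by
  intro idxs
  induction idxs with
  | nil => intro b t; simp
  | cons i rest ih =>
      intro b t
      simp only [List.map_cons, List.foldl_cons, Nat.succ_eq_add_one, hstep]
      exact ih b (step t i)

theorem pv_rowReplace_eq_map :
    ∀ rs : List String, rowReplace rs = rs.map (fun s => if s = "." then " " else s) := by
  intro rs
  unfold rowReplace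
  induction rs with
  | nil => simp
  | cons a t ih =>
      have hstep : ∀ (b : String) (t : List String) (i : Nat),
          (fun rl index => if rl.getD index "" = "." then rl.set index " " else rl) (b :: t) (i + 1)
          = b :: (fun rl index => if rl.getD index "" = "." then rl.set index " " else rl) t i := by
        intro b t i
        simp only [List.getD_cons_succ, List.set_cons_succ]
        split <;> rfl
      have h0 : (if (a :: t).getD 0 "" = "." then (a :: t).set 0 " " else a :: t)
          = (if a = "." then " " else a) :: t := by
        simp only [List.getD_cons_zero, List.set_cons_zero]
        split <;> rfl
      rw [List.length_cons, List.range_succ_eq_map, List.foldl_cons, h0,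
        pv_foldl_succ_idx _ hstep, List.map_cons, ih]

theorem pv_rowReplace_map_singleton (l : List Char) :
    rowReplace (l.map String.singleton) = l.map pvElem := by
  rw [pv_rowReplace_eq_map, List.map_map]
  apply List.map_congr_left
  intro c _
  by_cases h : c = '.'
  · subst h; rfl
  · have hne : String.singleton c ≠ "." := by
      intro hcontra
      exact h (by
        have := congrArg String.toList hcontra
        simpa [String.singleton] using this)
    simp [pvElem, h, hne]

theorem pv_gridOf_small {l : List Char} (h : l.length < 9) : pvGridOf l = [] := by
  simp [pvGridOf, Nat.div_eq_of_lt h]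

theorem pv_gridOf_block (r rest : List Char) (hr : r.length = 9) :
    pvGridOf (r ++ rest) = r.map pvElem :: pvGridOf rest := by
  unfold pvGridOf
  have hlen : (r ++ rest).length / 9 = rest.length / 9 + 1 := by
    rw [List.length_append, hr]; omega
  rw [hlen, List.range_succ_eq_map, List.map_cons, List.map_map]
  congr 1
  · rw [Nat.mul_zero, List.drop_zero]
    congr 1
    rw [← hr, List.take_left]
  · apply List.map_congr_left
    intro j _
    have hd : List.drop (9 * Nat.succ j) (r ++ rest) = List.drop (9 * j) rest := by
      rw [List.drop_append, List.drop_eq_nil_of_le (by omega), hr,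
        show 9 * Nat.succ j - 9 = 9 * j by omega, List.nil_append]
    simp only [Function.comp, hd]

theorem pv_foldA (l : List Char) :
    ∀ (grid : List (List String)) (row : List Char), row.length < 9 →
      (l.foldl stepA (grid, row.length, row)).1 = grid ++ pvGridOf (row ++ l) := by
  induction l with
  | nil =>
      intro grid row h
      simp [pv_gridOf_small h]
  | cons c rest ih =>
      intro grid row h
      rw [List.foldl_cons]
      by_cases h9 : row.length + 1 = 9
      · have hf : stepA (grid, row.length, row) c
            = (grid ++ [rowReplace ((row ++ [c]).map String.singleton)], 0, ([] : List Char)) := by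
          simp [stepA, h9]
        rw [hf]
        have := ih (grid ++ [rowReplace ((row ++ [c]).map String.singleton)]) [] (by simp)
        simp only [List.length_nil, List.nil_append] at this
        rw [this]
        have hblock : pvGridOf (row ++ c :: rest) = ((row ++ [c]).map pvElem) :: pvGridOf rest := by
          rw [show row ++ c :: rest = (row ++ [c]) ++ rest by simp,
            pv_gridOf_block _ _ (by simp; omega)]
        rw [hblock, pv_rowReplace_map_singleton]
        simp
      · have hf : stepA (grid, row.length, row) c = (grid, row.length + 1, row ++ [c]) := by
          simp [stepA, h9]
        rw [hf]
        have hlt : (row ++ [c]).length < 9 := by simp; omega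
        have := ih grid (row ++ [c]) hlt
        simp only [List.length_append, List.length_cons, List.length_nil] at this
        rw [show row.length + 1 = row.length + (0 + 1) by omega, this]
        simp

theorem pv_A_eq_gridOf (s : String) : get_grid s = pvGridOf s.toList := by
  unfold get_grid
  have := pv_foldA s.toList [] [] (by simp)
  simpa using this

theorem pv_pyRange_nine (q : Nat) :
    PySem.List.pyRange 0 (9 * (q : Int)) 9
      = (List.range q).map (fun k : Nat => ((9 * k : Nat) : Int)) := by
  rw [PySem.List.pyRange_of_pos _ _ (by norm_num)]
  have hcount : (if (0 : Int) < 9 * (q : Int) then ((9 * (q : Int) - 0 + 9 - 1) / 9).toNat else 0) = q := by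
    by_cases hq : 0 < q
    · rw [if_pos (by exact_mod_cast Nat.mul_pos (by norm_num) hq)]
      omega
    · have : q = 0 := by omega
      subst this; simp
  rw [hcount]
  apply List.map_congr_left
  intro k _
  push_cast
  ring

theorem pv_B_eq_gridOf (s : String) : get_grid_alt s = pvGridOf s.toList := by
  simp only [get_grid_alt, pvGridOf]
  rw [PySem.Int.mod_eq_emod_of_pos (by norm_num), List.length_map]
  have hn : ((s.toList.length : Int)) - ((s.toList.length : Int)) % 9
      = 9 * ((s.toList.length / 9 : Nat) : Int) := by omega
  rw [hn, pv_pyRange_nine, List.map_map]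
  apply List.map_congr_left
  intro k _
  have hcast : (((9 * k : Nat) : Int)) + 9 = (((9 * k : Nat) : Int)) + (((9 : Nat)) : Int) := by
    norm_num
  simp only [Function.comp, hcast, PySem.List.slice_natCast_add]
  rw [← List.map_drop, ← List.map_take]
  rfl

-- ===== VERDICT (by name: the statement is the Claim_ definition above) =====
theorem get_grid_spec : Claim_equal_get_grid := by
  intro s _
  unfold Spec_get_grid
  rw [pv_A_eq_gridOf, pv_B_eq_gridOf]
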